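-- pv_equiv track=rewrite | github.com/kylebittinger/okfasta | src/okfastalib/seqs.py | extract_regions
-- ===== SOURCE A (Python) =====
-- import collections
--
-- def get_seq_id(desc):
--     return desc.split()[0]
--
-- def extract_regions(regions, seqs):
--     regions_table = collections.defaultdict(list)
--     for seq_id, start_pos, end_pos in regions:
--         regions_table[seq_id].append((start_pos, end_pos))
--
--     for desc, seq in seqs:
--         seq_id = get_seq_id(desc)
--         for start_pos, end_pos in regions_table[seq_id]:
--             extract_id = "{0}__{1}_{2}".format(seq_id, start_pos, end_pos)
--             start_idx = start_pos - 1
--             end_idx = end_pos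
--             extract_seq = seq[start_idx:end_idx]
--             yield extract_id, extract_seq
-- ===== SOURCE B (Python) =====
-- def get_seq_id(desc):
--     return desc.split()[0]
--
-- def extract_regions(regions, seqs):
--     regions_list = list(regions)
--     pairs = [(get_seq_id(desc), seq) for desc, seq in seqs]
--     yield from (("{0}__{1}_{2}".format(sid, s, e), seq[s - 1:e])
--                 for sid, seq in pairs
--                 for rid, s, e in regions_list
--                 if rid == sid)
-- ===== Notes on version B (the rewrite author's own statement) =====
-- stated objective: simpler
-- what changed: Drops A's defaultdict index and accumulator loops: B first maps seqs to (seq_id, seq) pairs, then produces the whole output as one flat list comprehension that scans the materialized region list per pair.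
import Mathlib
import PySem

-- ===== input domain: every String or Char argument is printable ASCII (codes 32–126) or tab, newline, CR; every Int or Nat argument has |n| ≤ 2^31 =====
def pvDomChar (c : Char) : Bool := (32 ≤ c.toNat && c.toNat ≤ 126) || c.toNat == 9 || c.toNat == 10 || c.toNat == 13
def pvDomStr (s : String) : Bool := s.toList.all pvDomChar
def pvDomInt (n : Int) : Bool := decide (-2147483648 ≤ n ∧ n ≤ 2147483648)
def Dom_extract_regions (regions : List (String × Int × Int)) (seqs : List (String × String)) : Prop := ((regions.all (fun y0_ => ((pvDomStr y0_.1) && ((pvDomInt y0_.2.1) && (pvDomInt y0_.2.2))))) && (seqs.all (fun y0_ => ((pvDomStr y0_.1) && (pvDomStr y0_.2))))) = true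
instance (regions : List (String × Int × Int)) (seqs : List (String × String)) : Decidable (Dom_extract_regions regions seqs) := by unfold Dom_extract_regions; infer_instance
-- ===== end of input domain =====

-- ===== PORT A =====
-- B drops A's defaultdict index and accumulator loops for a staged map + flat comprehension (simpler; return value only, both are iterators).
-- get_seq_id(desc) = desc.split()[0]; Python raises IndexError on whitespace-only desc — excluded by Pre_ (pyGetD is only read under Pre_).
def pvGetSeqId (desc : String) : String :=
  PySem.List.pyGetD (PySem.Str.split₀ desc) 0 ""

def extract_regions (regions : List (String × Int × Int)) (seqs : List (String × String)) : List (String × String) :=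
  let regions_table := regions.foldl (fun d r => d.modify r.1 [] (fun l => l ++ [r.2])) PySem.Dict.empty
  seqs.foldl (fun acc ds =>
    let seq_id := pvGetSeqId ds.1
    acc ++ (regions_table.getD seq_id []).map (fun se =>
      (seq_id ++ "__" ++ PySem.Int.toStr se.1 ++ "_" ++ PySem.Int.toStr se.2,
       PySem.Str.slice ds.2 (some (se.1 - 1)) (some se.2)))) []

-- ===== PORT B =====
-- the inner comprehension clause: scan regions_list, keeping entries whose id equals sid
def pvScanRegions (sid seq : String) : List (String × Int × Int) → List (String × String)
  | [] => []
  | r :: rest =>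
    if r.1 == sid then
      (sid ++ "__" ++ PySem.Int.toStr r.2.1 ++ "_" ++ PySem.Int.toStr r.2.2,
       PySem.Str.slice seq (some (r.2.1 - 1)) (some r.2.2)) :: pvScanRegions sid seq rest
    else pvScanRegions sid seq rest

def extract_regions_alt (regions : List (String × Int × Int)) (seqs : List (String × String)) : List (String × String) :=
  let pairs := seqs.map (fun ds => (pvGetSeqId ds.1, ds.2))
  pairs.flatMap (fun p => pvScanRegions p.1 p.2 regions)

-- ===== PRECONDITION & SPEC =====
-- Pre_ excludes seqs containing a description with no whitespace-separated word (desc.split() == []), where A raises IndexError.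
def Pre_extract_regions (regions : List (String × Int × Int)) (seqs : List (String × String)) : Prop :=
  ∀ p ∈ seqs, PySem.Str.split₀ p.1 ≠ []
instance (regions : List (String × Int × Int)) (seqs : List (String × String)) : Decidable (Pre_extract_regions regions seqs) := by unfold Pre_extract_regions; infer_instance

def pvWitness_extract_regions : (List (String × Int × Int)) × (List (String × String)) :=
  ([("s1", 2, 3), ("s2", 1, 4)], [("s1 first", "ACGTA"), ("s2", "GGCC")])

def Spec_extract_regions (regions : List (String × Int × Int)) (seqs : List (String × String)) (out : List (String × String)) : Prop := out = extract_regions_alt regions seqs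
instance (regions : List (String × Int × Int)) (seqs : List (String × String)) (out : List (String × String)) : Decidable (Spec_extract_regions regions seqs out) := by unfold Spec_extract_regions; infer_instance

-- ===== CLAIM =====
def Claim_equal_extract_regions : Prop := ∀ (regions : List (String × Int × Int)) (seqs : List (String × String)), Dom_extract_regions regions seqs → Pre_extract_regions regions seqs → Spec_extract_regions regions seqs (extract_regions regions seqs)

-- ===== LEMMAS AND PROOFS =====
-- B's recursive scan is the filter-then-map of the regions list.
theorem pvScanRegions_eq (sid seq : String) (l : List (String × Int × Int)) :
    pvScanRegions sid seq l = (l.filter (fun r => r.1 == sid)).map (fun r =>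
      (sid ++ "__" ++ PySem.Int.toStr r.2.1 ++ "_" ++ PySem.Int.toStr r.2.2,
       PySem.Str.slice seq (some (r.2.1 - 1)) (some r.2.2))) := by
  induction l with
  | nil => rfl
  | cons r rest ih =>
    by_cases h : r.1 == sid <;> simp [pvScanRegions, h, ih]

-- A's per-sequence dict entry is that same filter (PySem.Dict.getD_foldl_modify_append).
theorem extract_regions_body (regions : List (String × Int × Int)) (ds : String × String) :
    ((regions.foldl (fun d r => d.modify r.1 [] (fun l => l ++ [r.2])) PySem.Dict.empty).getD (pvGetSeqId ds.1) []).map (fun se =>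
      (pvGetSeqId ds.1 ++ "__" ++ PySem.Int.toStr se.1 ++ "_" ++ PySem.Int.toStr se.2,
       PySem.Str.slice ds.2 (some (se.1 - 1)) (some se.2)))
    = pvScanRegions (pvGetSeqId ds.1) ds.2 regions := by
  rw [PySem.Dict.getD_foldl_modify_append, pvScanRegions_eq]
  simp [PySem.Dict.getD_empty, List.map_map, Function.comp_def]

-- ===== VERDICT =====
theorem extract_regions_spec : Claim_equal_extract_regions := by
  intro regions seqs _ _
  unfold Spec_extract_regions extract_regions extract_regions_alt
  dsimp only
  rw [PySem.List.foldl_append_eq_flatMap]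
  simp only [List.nil_append, List.flatMap_map, extract_regions_body]
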